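-- pv_equiv track=rewrite | github.com/martinazaki/Uni-Work | H11A-Chaos-Coding/src/auth_helpers.py | end_no
-- ===== SOURCE A (Python) =====
-- def end_no(handle, users):
--     """Checks handle count.
--
--     Params:
--     handle (string): Handle of the user.
--     users (dictionary): Information about user.
--
--     Returns:
--     none
--     """
--     end = 0
--     for user in users:
--         if handle in user['handle_str']:
--             end += 1
--         if handle not in user['handle_str'] and end != 0:
--             break
--
--     return end
-- ===== SOURCE B (Python) =====
-- def end_no(handle, users):
--     # Encode the match pattern as a bit-string, then answer with string ops:
--     # strip the leading non-matches ('0's) and measure the first block of '1's.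
--     bits = ''.join('1' if handle in u['handle_str'] else '0' for u in users)
--     return len(bits.lstrip('0').split('0', 1)[0])
-- ===== Notes on version B (the rewrite author's own statement) =====
-- stated objective: alternative
-- what changed: Replaces A's counter-plus-break loop with a data-reshaping approach: encode each user's match as a '1'/'0' character of a bit-string, then obtain the first contiguous run of matches purely with string operations (lstrip the leading '0's, take the segment before the next '0', measure its length).
-- outside the precondition, e.g. on end_no('a', [{'handle_str': 'a'}, {'handle_str': 'b'}, {}]): A returns 1, B raises KeyError
import Mathlib
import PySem

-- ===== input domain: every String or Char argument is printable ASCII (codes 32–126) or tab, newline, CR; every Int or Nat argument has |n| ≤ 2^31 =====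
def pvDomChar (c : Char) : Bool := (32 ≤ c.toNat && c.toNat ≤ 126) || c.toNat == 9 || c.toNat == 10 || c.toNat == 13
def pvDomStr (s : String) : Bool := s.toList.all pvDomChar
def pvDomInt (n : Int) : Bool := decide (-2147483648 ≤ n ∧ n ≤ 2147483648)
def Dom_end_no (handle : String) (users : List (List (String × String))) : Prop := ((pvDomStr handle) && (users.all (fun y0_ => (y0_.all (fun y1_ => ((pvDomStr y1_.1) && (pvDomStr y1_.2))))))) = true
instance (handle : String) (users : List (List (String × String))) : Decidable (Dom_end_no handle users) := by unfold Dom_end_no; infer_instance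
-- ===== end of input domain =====

-- B recasts A's counter-plus-break loop as data reshaping: a '1'/'0' bit-string of matches,
-- answered by lstrip + split + len (alternative decomposition, same cost).

-- u['handle_str'] (dict lookup; total form — Pre_ guarantees the key is present)
def handleStrOf (u : List (String × String)) : String :=
  ((PySem.Dict.mk u).get? "handle_str").getD ""

-- ===== PORT A =====
-- the for-loop of A: state is the counter `end`; break returns it early
def endNoLoop (handle : String) : List (List (String × String)) → Int → Int
  | [], e => e
  | u :: rest, e =>
    let s := handleStrOf u
    let e2 := if PySem.Str.isIn handle s then e + 1 else e
    if (!(PySem.Str.isIn handle s)) && (e2 != 0) then e2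
    else endNoLoop handle rest e2

def end_no (handle : String) (users : List (List (String × String))) : Int :=
  endNoLoop handle users 0

-- ===== PORT B =====
-- the comprehension "'1' if handle in u['handle_str'] else '0'" for one user
def bitOf (handle : String) (u : List (String × String)) : Char :=
  if PySem.Str.isIn handle (handleStrOf u) then '1' else '0'

def end_no_alt (handle : String) (users : List (List (String × String))) : Int :=
  -- ''.join of the one-char strings = exactly this list of chars
  let bits : List Char := users.map (bitOf handle)
  -- bits.lstrip('0'): drop leading chars belonging to {'0'} (exact for this char set)
  let t := bits.dropWhile (fun c => c == '0')
  -- .split('0', 1)[0]: the segment before the first '0' (exact: split's first field); len = length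
  ((t.takeWhile (fun c => c != '0')).length : Int)

-- ===== PRECONDITION & SPEC =====
-- Pre_ requires every user dict to carry the key 'handle_str'.  Outside Pre_ one of the two
-- programs raises KeyError: A when its loop reaches the key-less user before breaking, and B
-- (which evaluates every user eagerly while building the bit-string) on any key-less user.
def Pre_end_no (handle : String) (users : List (List (String × String))) : Prop :=
  ∀ u ∈ users, ((PySem.Dict.mk u).get? "handle_str").isSome
instance (handle : String) (users : List (List (String × String))) : Decidable (Pre_end_no handle users) := by unfold Pre_end_no; infer_instance

def pvWitness_end_no : String × (List (List (String × String))) :=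
  ("a", [[("handle_str", "xy")], [("handle_str", "abc")], [("handle_str", "b")]])

def Spec_end_no (handle : String) (users : List (List (String × String))) (out : Int) : Prop := out = end_no_alt handle users
instance (handle : String) (users : List (List (String × String))) (out : Int) : Decidable (Spec_end_no handle users out) := by unfold Spec_end_no; infer_instance

-- ===== CLAIM (what is proved, stated in full; the proofs are below) =====
def Claim_equal_end_no : Prop := ∀ (handle : String) (users : List (List (String × String))), Dom_end_no handle users → Pre_end_no handle users → Spec_end_no handle users (end_no handle users)

-- ===== LEMMAS AND PROOFS =====

theorem endNoLoop_cons (handle : String) (u : List (String × String))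
    (rest : List (List (String × String))) (e : Int) :
    endNoLoop handle (u :: rest) e =
      if PySem.Str.isIn handle (handleStrOf u) then endNoLoop handle rest (e + 1)
      else if e = 0 then endNoLoop handle rest e else e := by
  rw [endNoLoop]
  cases h : PySem.Str.isIn handle (handleStrOf u)
  · simp only [Bool.not_false, Bool.true_and, Bool.false_eq_true, if_false, bne_iff_ne,
      ne_eq, ite_not]
  · simp only [Bool.not_true, Bool.false_and, Bool.false_eq_true, if_false, if_true]

-- once the counter is positive, A just counts the leading run of matches
theorem endNoLoop_pos (handle : String) :
    ∀ (l : List (List (String × String))) (e : Int), 0 < e →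
      endNoLoop handle l e =
        e + (((l.map (bitOf handle)).takeWhile (fun c => c != '0')).length : Int) := by
  intro l
  induction l with
  | nil => intro e he; simp [endNoLoop]
  | cons u rest ih =>
    intro e he
    rw [endNoLoop_cons]
    by_cases hm : PySem.Str.isIn handle (handleStrOf u) = true
    · have hmc : PySem.Chars.isIn handle.toList (handleStrOf u).toList = true := by simpa using hm
      rw [if_pos hm, ih (e + 1) (by omega)]
      simp [bitOf, hmc]
      ring
    · have hmf : PySem.Str.isIn handle (handleStrOf u) = false := Bool.eq_false_iff.mpr hm
      have hmc : PySem.Chars.isIn handle.toList (handleStrOf u).toList = false := by simpa using hmf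
      rw [if_neg hm, if_neg (by omega : ¬ e = 0)]
      simp [bitOf, hmc]

theorem endNoLoop_zero (handle : String) (l : List (List (String × String))) :
    endNoLoop handle l 0 =
      ((((l.map (bitOf handle)).dropWhile (fun c => c == '0')).takeWhile
          (fun c => c != '0')).length : Int) := by
  induction l with
  | nil => simp [endNoLoop]
  | cons u rest ih =>
    rw [endNoLoop_cons]
    by_cases hm : PySem.Str.isIn handle (handleStrOf u) = true
    · have hmc : PySem.Chars.isIn handle.toList (handleStrOf u).toList = true := by simpa using hm
      rw [if_pos hm, (by norm_num : (0 : Int) + 1 = 1), endNoLoop_pos handle rest 1 (by omega)]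
      simp [bitOf, hmc]
      ring
    · have hmf : PySem.Str.isIn handle (handleStrOf u) = false := Bool.eq_false_iff.mpr hm
      have hmc : PySem.Chars.isIn handle.toList (handleStrOf u).toList = false := by simpa using hmf
      rw [if_neg hm, if_pos rfl, ih]
      simp [bitOf, hmc]

-- ===== VERDICT (by name: the statement is the Claim_ definition above) =====
theorem end_no_spec : Claim_equal_end_no := by
  intro handle users _ _
  unfold Spec_end_no end_no end_no_alt
  exact endNoLoop_zero handle users
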